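-- pv_equiv track=rewrite | github.com/LaurieRakotoarisoa/PISTL | src/nl4RealTime.py | add_elem
-- ===== SOURCE A (Python) =====
-- def add_elem(d,tags):
--     """
--         Add a word as a terminal symbol to a dictionary in their corresponding labels
--         and return the updated dictionary
--
--     Parameters
--     ----------
--         d : dict -> dictionary indexed by labels associated
--                     with a list of its corresponding terminal symbols
--
--         tags : list of tuple -> 2-tuples containing a word and its corresponding label
--
--     """
--
--     for (w,t) in tags:
--         if w == 'not':
--             d['NOT'] =[w]
--         elif w == 'If' or w == 'if' or w == 'IF':
--             d['IF'] =[w]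
--         elif w == 'then' or w == 'Then' or w == 'THEN':
--             d['THEN'] =[w]
--         elif w == 'Or' or w == 'or' or w == 'OR':
--             d['OR'] =[w]
--         elif w == 'And' or w == 'and' or w == 'AND':
--             d['AND'] =[w]
--         elif w == 'do' or w == 'Do' or w == 'DO':
--             d['DO'] = [w]
--         elif w == 'within':
--             d['WITHIN'] = [w]
--         elif w == 'afterwards':
--             d['AFTERWARDS'] = [w]
--         elif w == 'When' or w == 'when' or w == 'WHEN':
--             d['WHEN'] = [w]
--         elif t not in d:
--             if t.isalpha():
--                 d[t] = [w]
--         else: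
--             if w not in d[t]:
--                 d[t].append(w)
--     return d
-- ===== SOURCE B (Python) =====
-- KEYWORD_MAP = {
--     'not': 'NOT',
--     'If': 'IF', 'if': 'IF', 'IF': 'IF',
--     'then': 'THEN', 'Then': 'THEN', 'THEN': 'THEN',
--     'Or': 'OR', 'or': 'OR', 'OR': 'OR',
--     'And': 'AND', 'and': 'AND', 'AND': 'AND',
--     'do': 'DO', 'Do': 'DO', 'DO': 'DO',
--     'within': 'WITHIN',
--     'afterwards': 'AFTERWARDS',
--     'When': 'WHEN', 'when': 'WHEN', 'WHEN': 'WHEN',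
-- }
--
--
-- def _key_event(w, t):
--     """The dictionary key a pair targets, and its event: (True, w) = reset to [w]
--     (keyword), (False, w) = dedup-append of w under tag t."""
--     label = KEYWORD_MAP.get(w)
--     if label is not None:
--         return (label, (True, w))
--     return (t, (False, w))
--
--
-- def _finalize(cur, evs):
--     """Replay the events of ONE key over its start value (None = key absent)."""
--     for is_reset, w in evs:
--         if is_reset or cur is None:
--             cur = [w]
--         elif w not in cur:
--             cur = cur + [w]
--     return cur
--
--
-- def add_elem(d, tags):
--     # Phase 1: group the events by the key they target (order preserved per key).
--     pairs = [_key_event(w, t) for (w, t) in tags]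
--     events = {}
--     for k, e in pairs:
--         events.setdefault(k, []).append(e)
--     # Phase 2: each key's final list is computed independently.
--     out = {}
--     for k, v in d.items():
--         out[k] = _finalize(v, events.get(k, ()))
--     # New keys appear in the order of their first event; a key absent from d is
--     # ever created only if it is alphabetic (keyword labels are all alphabetic).
--     for k, evs in events.items():
--         if k not in d and k.isalpha():
--             out[k] = _finalize(None, evs)
--     return out
-- ===== Notes on version B (the rewrite author's own statement) =====
-- stated objective: alternative
-- what changed: B replaces A's sequential simulation of the dict (per-pair branch cascade mutating d step by step) by a group-by-key algorithm: it first maps each pair to a (key, event) via a precomputed keyword table, groups the events per key, then computes every key's final list independently (existing keys in place, created alphabetic keys appended in first-event order).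
import Mathlib
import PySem

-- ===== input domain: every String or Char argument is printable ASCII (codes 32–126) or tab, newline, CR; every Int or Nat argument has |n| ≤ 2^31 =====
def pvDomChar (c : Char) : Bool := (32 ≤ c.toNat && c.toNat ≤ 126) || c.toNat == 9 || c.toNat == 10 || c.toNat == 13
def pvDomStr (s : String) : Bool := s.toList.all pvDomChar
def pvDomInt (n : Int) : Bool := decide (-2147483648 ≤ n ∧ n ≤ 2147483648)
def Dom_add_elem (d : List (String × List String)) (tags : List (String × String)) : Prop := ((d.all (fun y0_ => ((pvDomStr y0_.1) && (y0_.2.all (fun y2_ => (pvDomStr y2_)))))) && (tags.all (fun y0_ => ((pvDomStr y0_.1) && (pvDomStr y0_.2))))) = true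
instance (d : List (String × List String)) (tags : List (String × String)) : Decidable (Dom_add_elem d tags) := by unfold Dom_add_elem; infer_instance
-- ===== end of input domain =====

-- B replaces A's sequential simulation of the dict (one pass mutating d step by step) by a
-- group-by-key algorithm: collect every pair's (key, event) first, then compute each key's final
-- list independently. Same return value; A mutates d in place in Python, B builds a fresh dict —
-- the equivalence proved here is about the RETURN value.

-- ===== PORT A =====
-- one iteration of A's loop body, branch for branch
def add_elemStepA (dd : PySem.Dict String (List String)) (wt : String × String) : PySem.Dict String (List String) :=
  let w := wt.1
  let t := wt.2
  if w = "not" then dd.insert "NOT" [w]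
  else if w = "If" ∨ w = "if" ∨ w = "IF" then dd.insert "IF" [w]
  else if w = "then" ∨ w = "Then" ∨ w = "THEN" then dd.insert "THEN" [w]
  else if w = "Or" ∨ w = "or" ∨ w = "OR" then dd.insert "OR" [w]
  else if w = "And" ∨ w = "and" ∨ w = "AND" then dd.insert "AND" [w]
  else if w = "do" ∨ w = "Do" ∨ w = "DO" then dd.insert "DO" [w]
  else if w = "within" then dd.insert "WITHIN" [w]
  else if w = "afterwards" then dd.insert "AFTERWARDS" [w]
  else if w = "When" ∨ w = "when" ∨ w = "WHEN" then dd.insert "WHEN" [w]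
  else if ¬ (dd.contains t) then
    (if PySem.Str.strIsalpha t then dd.insert t [w] else dd)
  else
    (let l := dd.getD t []
     if w ∈ l then dd else dd.insert t (l ++ [w]))

def add_elem (d : List (String × List String)) (tags : List (String × String)) : List (String × List String) :=
  (tags.foldl add_elemStepA (PySem.Dict.mk d)).items

-- ===== PORT B =====
-- the constant KEYWORD_MAP of Source B
def pvKeywordMap : PySem.Dict String String := PySem.Dict.mk
  [("not", "NOT"),
   ("If", "IF"), ("if", "IF"), ("IF", "IF"),
   ("then", "THEN"), ("Then", "THEN"), ("THEN", "THEN"),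
   ("Or", "OR"), ("or", "OR"), ("OR", "OR"),
   ("And", "AND"), ("and", "AND"), ("AND", "AND"),
   ("do", "DO"), ("Do", "DO"), ("DO", "DO"),
   ("within", "WITHIN"),
   ("afterwards", "AFTERWARDS"),
   ("When", "WHEN"), ("when", "WHEN"), ("WHEN", "WHEN")]

-- Source B's _key_event
def add_elemKeyEvent (wt : String × String) : String × (Bool × String) :=
  match pvKeywordMap.get? wt.1 with
  | some label => (label, (true, wt.1))
  | none => (wt.2, (false, wt.1))

-- Source B's _finalize: replay one key's events over its start value (none = key absent)
def add_elemFin (cur : Option (List String)) (evs : List (Bool × String)) : Option (List String) :=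
  evs.foldl (fun c e =>
    match c with
    | none => some [e.2]
    | some l => if e.1 then some [e.2] else if e.2 ∈ l then some l else some (l ++ [e.2])) cur

def add_elem_alt (d : List (String × List String)) (tags : List (String × String)) : List (String × List String) :=
  let d0 := PySem.Dict.mk d
  -- Phase 1: group the events by the key they target
  let pairs := tags.map add_elemKeyEvent
  let events := pairs.foldl (fun g p => g.modify p.1 [] (· ++ [p.2])) PySem.Dict.empty
  -- Phase 2: each key's final list is computed independently
  let out1 := d0.items.foldl
    (fun out kv => out.insert kv.1 ((add_elemFin (some kv.2) (events.getD kv.1 [])).getD []))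
    PySem.Dict.empty
  let out2 := events.items.foldl
    (fun out ke =>
      if !(d0.contains ke.1) && PySem.Str.strIsalpha ke.1 then
        out.insert ke.1 ((add_elemFin none ke.2).getD [])
      else out)
    out1
  out2.items

-- ===== PRECONDITION & SPEC =====
-- d is the association list of a Python dict, whose keys are unique by construction: an
-- association list with duplicate keys represents no dict input of A, so Pre_ excludes it.
def Pre_add_elem (d : List (String × List String)) (tags : List (String × String)) : Prop :=
  (d.map Prod.fst).Nodup
instance (d : List (String × List String)) (tags : List (String × String)) : Decidable (Pre_add_elem d tags) := by unfold Pre_add_elem; infer_instance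

def pvWitness_add_elem : (List (String × List String)) × (List (String × String)) :=
  ([("T", ["x"])], [("not", "T"), ("foo", "T"), ("bar", "Tag")])

def Spec_add_elem (d : List (String × List String)) (tags : List (String × String)) (out : List (String × List String)) : Prop := out = add_elem_alt d tags
instance (d : List (String × List String)) (tags : List (String × String)) (out : List (String × List String)) : Decidable (Spec_add_elem d tags out) := by unfold Spec_add_elem; infer_instance

-- ===== CLAIM (what is proved, stated in full; the proofs are below) =====
def Claim_equal_add_elem : Prop := ∀ (d : List (String × List String)) (tags : List (String × String)), Dom_add_elem d tags → Pre_add_elem d tags → Spec_add_elem d tags (add_elem d tags)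

-- ===== LEMMAS AND PROOFS =====

-- canonical reformulation of A's loop body, phrased through B's _key_event
def pvStepC (dd : PySem.Dict String (List String)) (wt : String × String) : PySem.Dict String (List String) :=
  let ke := add_elemKeyEvent wt
  if ke.2.1 then dd.insert ke.1 [ke.2.2]
  else if dd.contains ke.1 then
    (let l := dd.getD ke.1 []
     if ke.2.2 ∈ l then dd else dd.insert ke.1 (l ++ [ke.2.2]))
  else if PySem.Str.strIsalpha ke.1 then dd.insert ke.1 [ke.2.2]
  else dd

-- the ordered event list of one key, and the keys in order of first event
def pvEvts (tags : List (String × String)) (k : String) : List (Bool × String) :=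
  ((tags.map add_elemKeyEvent).filter (fun p => p.1 == k)).map Prod.snd

def pvGKeys (tags : List (String × String)) : List String :=
  PySem.Set.ofList ((tags.map add_elemKeyEvent).map Prod.fst)

def pvCond (d0 : PySem.Dict String (List String)) (k : String) : Bool :=
  !(d0.contains k) && PySem.Str.strIsalpha k

-- the closed description both ports compute: old keys updated in place, then the created keys
def pvSpecItems (d0 : PySem.Dict String (List String)) (tags : List (String × String)) : List (String × List String) :=
  d0.items.map (fun kv => (kv.1, (add_elemFin (some kv.2) (pvEvts tags kv.1)).getD []))
  ++ ((pvGKeys tags).filter (pvCond d0)).map (fun k => (k, (add_elemFin none (pvEvts tags k)).getD []))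

lemma stepA_eq_stepC (dd : PySem.Dict String (List String)) (wt : String × String) :
    add_elemStepA dd wt = pvStepC dd wt := by
  obtain ⟨w, t⟩ := wt
  simp only [add_elemStepA, pvStepC, add_elemKeyEvent, pvKeywordMap, PySem.Dict.get?_mk_cons]
  by_cases h1 : w = "not"
  · simp [h1]
  by_cases h2 : w = "If"
  · simp [h2]
  by_cases h3 : w = "if"
  · simp [h3]
  by_cases h4 : w = "IF"
  · simp [h4]
  by_cases h5 : w = "then"
  · simp [h5]
  by_cases h6 : w = "Then"
  · simp [h6]
  by_cases h7 : w = "THEN"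
  · simp [h7]
  by_cases h8 : w = "Or"
  · simp [h8]
  by_cases h9 : w = "or"
  · simp [h9]
  by_cases h10 : w = "OR"
  · simp [h10]
  by_cases h11 : w = "And"
  · simp [h11]
  by_cases h12 : w = "and"
  · simp [h12]
  by_cases h13 : w = "AND"
  · simp [h13]
  by_cases h14 : w = "do"
  · simp [h14]
  by_cases h15 : w = "Do"
  · simp [h15]
  by_cases h16 : w = "DO"
  · simp [h16]
  by_cases h17 : w = "within"
  · simp [h17]
  by_cases h18 : w = "afterwards"
  · simp [h18]
  by_cases h19 : w = "When"
  · simp [h19]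
  by_cases h20 : w = "when"
  · simp [h20]
  by_cases h21 : w = "WHEN"
  · simp [h21]
  have g1 : (("not" : String) == w) = false := beq_eq_false_iff_ne.mpr (Ne.symm h1)
  have g2 : (("If" : String) == w) = false := beq_eq_false_iff_ne.mpr (Ne.symm h2)
  have g3 : (("if" : String) == w) = false := beq_eq_false_iff_ne.mpr (Ne.symm h3)
  have g4 : (("IF" : String) == w) = false := beq_eq_false_iff_ne.mpr (Ne.symm h4)
  have g5 : (("then" : String) == w) = false := beq_eq_false_iff_ne.mpr (Ne.symm h5)
  have g6 : (("Then" : String) == w) = false := beq_eq_false_iff_ne.mpr (Ne.symm h6)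
  have g7 : (("THEN" : String) == w) = false := beq_eq_false_iff_ne.mpr (Ne.symm h7)
  have g8 : (("Or" : String) == w) = false := beq_eq_false_iff_ne.mpr (Ne.symm h8)
  have g9 : (("or" : String) == w) = false := beq_eq_false_iff_ne.mpr (Ne.symm h9)
  have g10 : (("OR" : String) == w) = false := beq_eq_false_iff_ne.mpr (Ne.symm h10)
  have g11 : (("And" : String) == w) = false := beq_eq_false_iff_ne.mpr (Ne.symm h11)
  have g12 : (("and" : String) == w) = false := beq_eq_false_iff_ne.mpr (Ne.symm h12)
  have g13 : (("AND" : String) == w) = false := beq_eq_false_iff_ne.mpr (Ne.symm h13)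
  have g14 : (("do" : String) == w) = false := beq_eq_false_iff_ne.mpr (Ne.symm h14)
  have g15 : (("Do" : String) == w) = false := beq_eq_false_iff_ne.mpr (Ne.symm h15)
  have g16 : (("DO" : String) == w) = false := beq_eq_false_iff_ne.mpr (Ne.symm h16)
  have g17 : (("within" : String) == w) = false := beq_eq_false_iff_ne.mpr (Ne.symm h17)
  have g18 : (("afterwards" : String) == w) = false := beq_eq_false_iff_ne.mpr (Ne.symm h18)
  have g19 : (("When" : String) == w) = false := beq_eq_false_iff_ne.mpr (Ne.symm h19)
  have g20 : (("when" : String) == w) = false := beq_eq_false_iff_ne.mpr (Ne.symm h20)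
  have g21 : (("WHEN" : String) == w) = false := beq_eq_false_iff_ne.mpr (Ne.symm h21)
  have ge : (PySem.Dict.mk ([] : List (String × String))).get? w = none := rfl
  simp only [h1, h2, h3, h4, h5, h6, h7, h8, h9, h10, h11, h12, h13, h14, h15, h16, h17, h18, h19,
    h20, h21, g1, g2, g3, g4, g5, g6, g7, g8, g9, g10, g11, g12, g13, g14, g15, g16, g17, g18, g19,
    g20, g21, ge, if_false, or_self]
  by_cases hc : dd.contains t <;> simp [hc]

lemma keyEvent_reset_alpha (wt : String × String) (h : (add_elemKeyEvent wt).2.1 = true) :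
    PySem.Str.strIsalpha (add_elemKeyEvent wt).1 = true := by
  rcases hg : pvKeywordMap.get? wt.1 with _ | label
  · simp [add_elemKeyEvent, hg] at h
  · have hl : label ∈ pvKeywordMap.values := by
      have := PySem.Dict.mem_items_of_get?_eq_some pvKeywordMap hg
      simpa [PySem.Dict.values] using List.mem_map_of_mem this (f := Prod.snd)
    have hk : (add_elemKeyEvent wt).1 = label := by simp [add_elemKeyEvent, hg]
    rw [hk]
    fin_cases hl <;> decide

lemma fin_append (c : Option (List String)) (l1 l2 : List (Bool × String)) :
    add_elemFin c (l1 ++ l2) = add_elemFin (add_elemFin c l1) l2 := by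
  simp [add_elemFin, List.foldl_append]

lemma fin_some_isSome (evs : List (Bool × String)) (c : List String) :
    (add_elemFin (some c) evs).isSome := by
  induction evs generalizing c with
  | nil => rfl
  | cons e evs ih =>
      have step : add_elemFin (some c) (e :: evs)
          = add_elemFin (if e.1 then some [e.2] else if e.2 ∈ c then some c else some (c ++ [e.2])) evs := by
        simp only [add_elemFin, List.foldl_cons]
      rw [step]
      split_ifs <;> exact ih _

lemma fin_none_cons (e : Bool × String) (evs : List (Bool × String)) :
    add_elemFin none (e :: evs) = add_elemFin (some [e.2]) evs := rfl

lemma evts_append (tags : List (String × String)) (x : String × String) (k : String) :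
    pvEvts (tags ++ [x]) k
      = pvEvts tags k ++ (if (add_elemKeyEvent x).1 = k then [(add_elemKeyEvent x).2] else []) := by
  simp [pvEvts, List.filter_append, List.filter_cons, apply_ite (List.map Prod.snd)]

lemma gkeys_append (tags : List (String × String)) (x : String × String) :
    pvGKeys (tags ++ [x])
      = if (add_elemKeyEvent x).1 ∈ pvGKeys tags then pvGKeys tags
        else pvGKeys tags ++ [(add_elemKeyEvent x).1] := by
  unfold pvGKeys
  rw [List.map_append, List.map_cons, List.map_nil, List.map_append, List.map_cons, List.map_nil,
    PySem.Set.ofList_append_singleton, PySem.Set.add_eq_ite]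

lemma mem_gkeys_iff (tags : List (String × String)) (k : String) :
    k ∈ pvGKeys tags ↔ pvEvts tags k ≠ [] := by
  rw [pvGKeys, PySem.Set.mem_ofList, List.mem_map]
  simp only [pvEvts, ne_eq, List.map_eq_nil_iff, List.filter_eq_nil_iff, not_forall, not_not]
  constructor
  · rintro ⟨p, hp, rfl⟩
    exact ⟨p, hp, by simp⟩
  · rintro ⟨p, hp, hk⟩
    exact ⟨p, hp, by simpa using hk⟩

lemma spec_keys (d0 : PySem.Dict String (List String)) (tags : List (String × String)) :
    (pvSpecItems d0 tags).map Prod.fst = d0.keys ++ (pvGKeys tags).filter (pvCond d0) := by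
  simp [pvSpecItems, List.map_map, Function.comp_def, PySem.Dict.keys, List.map_id']

lemma spec_keys_nodup (d0 : PySem.Dict String (List String)) (h : d0.keys.Nodup)
    (tags : List (String × String)) : ((pvSpecItems d0 tags).map Prod.fst).Nodup := by
  rw [spec_keys]
  refine List.Nodup.append h ((PySem.Set.nodup_ofList _).filter _) ?_
  intro k hk hk2
  have := List.of_mem_filter hk2
  simp only [pvCond, Bool.and_eq_true, Bool.not_eq_true'] at this
  rw [PySem.Dict.contains_eq_decide_mem_keys] at this
  simp [hk] at this

lemma fin_snoc (c : Option (List String)) (l : List (Bool × String)) (e : Bool × String) :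
    add_elemFin c (l ++ [e])
      = (match add_elemFin c l with
         | none => some [e.2]
         | some L => if e.1 then some [e.2] else if e.2 ∈ L then some L else some (L ++ [e.2])) := by
  rw [fin_append]; rfl

lemma fin_snoc_reset (c : Option (List String)) (l : List (Bool × String)) (w : String) :
    add_elemFin c (l ++ [(true, w)]) = some [w] := by
  rw [fin_snoc]; rcases add_elemFin c l with _ | L <;> simp

lemma fin_snoc_app (c : Option (List String)) (l : List (Bool × String)) (w : String) (L : List String)
    (hL : add_elemFin c l = some L) :
    add_elemFin c (l ++ [(false, w)]) = if w ∈ L then some L else some (L ++ [w]) := by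
  rw [fin_snoc, hL]; simp

lemma evts_of_not_gkey (tags : List (String × String)) (k : String) (hk : k ∉ pvGKeys tags) :
    pvEvts tags k = [] := by
  by_contra hne
  exact hk ((mem_gkeys_iff tags k).mpr hne)

lemma fin_none_isSome (evs : List (Bool × String)) (h : evs ≠ []) :
    (add_elemFin none evs).isSome := by
  cases evs with
  | nil => exact absurd rfl h
  | cons e l => rw [fin_none_cons]; exact fin_some_isSome l [e.2]

-- the old-keys section of the spec is unchanged by one more event when no old entry is affected
lemma base_congr (d0 : PySem.Dict String (List String)) (tags : List (String × String))
    (κ : String) (e : Bool × String)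
    (hstay : ∀ kv ∈ d0.items, κ = kv.1 →
      (add_elemFin (some kv.2) (pvEvts tags kv.1 ++ [e])).getD []
        = (add_elemFin (some kv.2) (pvEvts tags kv.1)).getD []) :
    d0.items.map (fun kv => (kv.1,
        (add_elemFin (some kv.2) (pvEvts tags kv.1 ++ if κ = kv.1 then [e] else [])).getD []))
      = d0.items.map (fun kv => (kv.1, (add_elemFin (some kv.2) (pvEvts tags kv.1)).getD [])) := by
  refine List.map_congr_left (fun kv hkv => ?_)
  by_cases hk : κ = kv.1
  · rw [if_pos hk, hstay kv hkv hk]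
  · rw [if_neg hk, List.append_nil]

lemma new_congr (d0 : PySem.Dict String (List String)) (tags : List (String × String))
    (κ : String) (e : Bool × String)
    (hstay : ∀ k ∈ (pvGKeys tags).filter (pvCond d0), κ = k →
      (add_elemFin none (pvEvts tags k ++ [e])).getD []
        = (add_elemFin none (pvEvts tags k)).getD []) :
    ((pvGKeys tags).filter (pvCond d0)).map (fun k => (k,
        (add_elemFin none (pvEvts tags k ++ if κ = k then [e] else [])).getD []))
      = ((pvGKeys tags).filter (pvCond d0)).map (fun k => (k,
        (add_elemFin none (pvEvts tags k)).getD [])) := by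
  refine List.map_congr_left (fun k hk => ?_)
  by_cases hkκ : κ = k
  · rw [if_pos hkκ, hstay k hk hkκ]
  · rw [if_neg hkκ, List.append_nil]

-- updating the κ entry of the old-keys section in place
lemma upd_base (d0 : PySem.Dict String (List String)) (tags : List (String × String))
    (κ : String) (e : Bool × String) (val : List String)
    (hval : ∀ kv ∈ d0.items, κ = kv.1 →
      (add_elemFin (some kv.2) (pvEvts tags kv.1 ++ [e])).getD [] = val) :
    (d0.items.map (fun kv => (kv.1, (add_elemFin (some kv.2) (pvEvts tags kv.1)).getD []))).map
        (fun p => if (p.1 == κ) = true then (κ, val) else p)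
      = d0.items.map (fun kv => (kv.1,
        (add_elemFin (some kv.2) (pvEvts tags kv.1 ++ if κ = kv.1 then [e] else [])).getD [])) := by
  rw [List.map_map]
  refine List.map_congr_left (fun kv hkv => ?_)
  by_cases hk : κ = kv.1
  · subst hk
    simp [hval kv hkv rfl]
  · have hbeq : (kv.1 == κ) = false := beq_eq_false_iff_ne.mpr (Ne.symm hk)
    simp only [Function.comp_apply, hbeq, if_neg hk, List.append_nil, Bool.false_eq_true,
      if_false]

lemma upd_new (d0 : PySem.Dict String (List String)) (tags : List (String × String))
    (κ : String) (e : Bool × String) (val : List String)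
    (hval : ∀ k ∈ (pvGKeys tags).filter (pvCond d0), κ = k →
      (add_elemFin none (pvEvts tags k ++ [e])).getD [] = val) :
    (((pvGKeys tags).filter (pvCond d0)).map (fun k => (k,
        (add_elemFin none (pvEvts tags k)).getD []))).map
        (fun p => if (p.1 == κ) = true then (κ, val) else p)
      = ((pvGKeys tags).filter (pvCond d0)).map (fun k => (k,
        (add_elemFin none (pvEvts tags k ++ if κ = k then [e] else [])).getD [])) := by
  rw [List.map_map]
  refine List.map_congr_left (fun k hk => ?_)
  by_cases hkκ : κ = k
  · subst hkκ
    simp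
    exact (hval _ hk rfl).symm
  · have hbeq : (k == κ) = false := beq_eq_false_iff_ne.mpr (Ne.symm hkκ)
    simp only [Function.comp_apply, hbeq, if_neg hkκ, List.append_nil, Bool.false_eq_true,
      if_false]

lemma step_spec (d0 : PySem.Dict String (List String)) (h : d0.keys.Nodup)
    (tags : List (String × String)) (x : String × String) :
    pvStepC (PySem.Dict.mk (pvSpecItems d0 tags)) x = PySem.Dict.mk (pvSpecItems d0 (tags ++ [x])) := by
  apply PySem.Dict.ext
  rcases hx : add_elemKeyEvent x with ⟨κ, b, w⟩
  have hE : ∀ k, pvEvts (tags ++ [x]) k = pvEvts tags k ++ (if κ = k then [(b, w)] else []) := by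
    intro k; rw [evts_append, hx]
  have hG' : pvGKeys (tags ++ [x]) = if κ ∈ pvGKeys tags then pvGKeys tags
      else pvGKeys tags ++ [κ] := by
    rw [gkeys_append, hx]
  set M : PySem.Dict String (List String) := PySem.Dict.mk (pvSpecItems d0 tags) with hM
  have hMit : M.items = pvSpecItems d0 tags := rfl
  have hMkeys : M.keys = d0.keys ++ (pvGKeys tags).filter (pvCond d0) := spec_keys d0 tags
  have hMnd : M.keys.Nodup := spec_keys_nodup d0 h tags
  have hcont : M.contains κ = true ↔ κ ∈ d0.keys ∨ κ ∈ (pvGKeys tags).filter (pvCond d0) := by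
    rw [PySem.Dict.contains_eq_decide_mem_keys, hMkeys]
    simp
  -- the right-hand side, split into its two sections
  have hRHS : pvSpecItems d0 (tags ++ [x])
      = d0.items.map (fun kv => (kv.1,
          (add_elemFin (some kv.2) (pvEvts tags kv.1 ++ if κ = kv.1 then [(b, w)] else [])).getD []))
        ++ ((if κ ∈ pvGKeys tags then pvGKeys tags else pvGKeys tags ++ [κ]).filter (pvCond d0)).map
            (fun k => (k, (add_elemFin none (pvEvts tags k ++ if κ = k then [(b, w)] else [])).getD [])) := by
    rw [pvSpecItems, hG']
    congr 1
    · exact List.map_congr_left (fun kv _ => by rw [hE])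
    · exact List.map_congr_left (fun k _ => by rw [hE])
  -- the value the dict holds at κ, per section
  have hvalOld : ∀ kv ∈ d0.items, κ = kv.1 →
      M.getD κ [] = (add_elemFin (some kv.2) (pvEvts tags kv.1)).getD [] := by
    intro kv hkv hk
    have hm : (kv.1, (add_elemFin (some kv.2) (pvEvts tags kv.1)).getD []) ∈ M.items := by
      rw [hMit, pvSpecItems]
      exact List.mem_append_left _ (List.mem_map_of_mem hkv)
    rw [hk]
    exact PySem.Dict.getD_of_mem_items M hm hMnd []
  have hvalNew : ∀ k ∈ (pvGKeys tags).filter (pvCond d0), κ = k →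
      M.getD κ [] = (add_elemFin none (pvEvts tags k)).getD [] := by
    intro k hk hkκ
    have hm : (k, (add_elemFin none (pvEvts tags k)).getD []) ∈ M.items := by
      rw [hMit, pvSpecItems]
      exact List.mem_append_right _ (List.mem_map_of_mem hk)
    rw [hkκ]
    exact PySem.Dict.getD_of_mem_items M hm hMnd []
  have hnonnil : ∀ k ∈ (pvGKeys tags).filter (pvCond d0), pvEvts tags k ≠ [] :=
    fun k hk => (mem_gkeys_iff tags k).mp (List.mem_of_mem_filter hk)
  show (pvStepC M x).items = pvSpecItems d0 (tags ++ [x])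
  rw [hRHS]
  have hstepeq : pvStepC M x
      = (if b then M.insert κ [w]
         else if M.contains κ then
           (let l := M.getD κ []
            if w ∈ l then M else M.insert κ (l ++ [w]))
         else if PySem.Str.strIsalpha κ then M.insert κ [w] else M) := by
    simp only [pvStepC, hx]
  rw [hstepeq]
  by_cases hb : b = true
  · -- RESET: the pair is a keyword, the label's entry becomes [w]
    subst hb
    have halpha : PySem.Str.strIsalpha κ = true := by
      have h1 : (add_elemKeyEvent x).2.1 = true := by rw [hx]
      have := keyEvent_reset_alpha x h1
      rwa [hx] at this
    rw [if_pos rfl]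
    by_cases hc : M.contains κ = true
    · rw [PySem.Dict.items_insert_of_contains M [w] hc, hMit, pvSpecItems, List.map_append]
      congr 1
      · exact upd_base d0 tags κ (true, w) [w] (fun kv _ _ => by rw [fin_snoc_reset]; rfl)
      · by_cases hGm : κ ∈ pvGKeys tags
        · rw [if_pos hGm]
          exact upd_new d0 tags κ (true, w) [w] (fun k _ _ => by rw [fin_snoc_reset]; rfl)
        · rw [if_neg hGm, List.filter_append]
          have hκd : κ ∈ d0.keys := by
            rcases hcont.mp hc with h1 | h2
            · exact h1
            · exact absurd (List.mem_of_mem_filter h2) hGm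
          rw [show List.filter (pvCond d0) [κ] = [] from by
              simp [pvCond, PySem.Dict.contains_eq_decide_mem_keys, hκd], List.append_nil]
          exact upd_new d0 tags κ (true, w) [w] (fun k _ _ => by rw [fin_snoc_reset]; rfl)
    · have hc' : M.contains κ = false := by simpa using hc
      have hκd : κ ∉ d0.keys := fun hm => hc (hcont.mpr (Or.inl hm))
      have hGm : κ ∉ pvGKeys tags := fun hg => hc (hcont.mpr (Or.inr (List.mem_filter.mpr
        ⟨hg, by simp [pvCond, show PySem.Chars.strIsalpha κ.toList = true from halpha, PySem.Dict.contains_eq_decide_mem_keys, hκd]⟩)))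
      rw [PySem.Dict.items_insert_of_not_contains M [w] hc', hMit, pvSpecItems, if_neg hGm,
        List.filter_append,
        show List.filter (pvCond d0) [κ] = [κ] from by
          simp [pvCond, show PySem.Chars.strIsalpha κ.toList = true from halpha, PySem.Dict.contains_eq_decide_mem_keys, hκd],
        List.map_append, List.append_assoc]
      congr 1
      · exact (base_congr d0 tags κ (true, w) (fun kv hkv hk => absurd
          (show κ ∈ d0.keys from hk ▸ (List.mem_map_of_mem hkv : kv.1 ∈ _)) hκd)).symm
      congr 1
      · exact (new_congr d0 tags κ (true, w) (fun k hk hkκ =>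
          absurd (hkκ ▸ List.mem_of_mem_filter hk) hGm)).symm
      · simp [evts_of_not_gkey tags κ hGm, add_elemFin]
  · -- APPEND: an ordinary tag pair
    have hbf : b = false := by simpa using hb
    subst hbf
    rw [if_neg (by simp)]
    by_cases hc : M.contains κ = true
    · rw [if_pos hc]
      by_cases hwl : w ∈ M.getD κ []
      · rw [show (let l := M.getD κ []
            if w ∈ l then M else M.insert κ (l ++ [w])) = M from by simp [hwl], hMit, pvSpecItems]
        congr 1
        · refine (base_congr d0 tags κ (false, w) (fun kv hkv hk => ?_)).symm
          obtain ⟨L, hLs⟩ := Option.isSome_iff_exists.mp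
            (fin_some_isSome (pvEvts tags kv.1) kv.2)
          have hwL : w ∈ L := by
            have := hvalOld kv hkv hk
            rw [hLs] at this
            rwa [this] at hwl
          rw [fin_snoc_app _ _ w L hLs, if_pos hwL, hLs]
        · by_cases hGm : κ ∈ pvGKeys tags
          · rw [if_pos hGm]
            refine (new_congr d0 tags κ (false, w) (fun k hk hkκ => ?_)).symm
            obtain ⟨L, hLs⟩ := Option.isSome_iff_exists.mp
              (fin_none_isSome (pvEvts tags k) (hnonnil k hk))
            have hwL : w ∈ L := by
              have := hvalNew k hk hkκ
              rw [hLs] at this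
              rwa [this] at hwl
            rw [fin_snoc_app _ _ w L hLs, if_pos hwL, hLs]
          · rw [if_neg hGm, List.filter_append]
            have hκd : κ ∈ d0.keys := by
              rcases hcont.mp hc with h1 | h2
              · exact h1
              · exact absurd (List.mem_of_mem_filter h2) hGm
            rw [show List.filter (pvCond d0) [κ] = [] from by
                simp [pvCond, PySem.Dict.contains_eq_decide_mem_keys, hκd], List.append_nil]
            exact (new_congr d0 tags κ (false, w) (fun k hk hkκ =>
              absurd (hkκ ▸ List.mem_of_mem_filter hk) hGm)).symm
      · rw [show (let l := M.getD κ []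
            if w ∈ l then M else M.insert κ (l ++ [w])) = M.insert κ (M.getD κ [] ++ [w]) from by
            simp [hwl],
          PySem.Dict.items_insert_of_contains M (M.getD κ [] ++ [w]) hc, hMit, pvSpecItems,
          List.map_append]
        congr 1
        · refine upd_base d0 tags κ (false, w) (M.getD κ [] ++ [w]) (fun kv hkv hk => ?_)
          obtain ⟨L, hLs⟩ := Option.isSome_iff_exists.mp
            (fin_some_isSome (pvEvts tags kv.1) kv.2)
          have hMg : M.getD κ [] = L := by
            have := hvalOld kv hkv hk
            rwa [hLs] at this
          have hwL : w ∉ L := fun hw => hwl (by rw [hMg]; exact hw)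
          rw [fin_snoc_app _ _ w L hLs, if_neg hwL, hMg]
          rfl
        · by_cases hGm : κ ∈ pvGKeys tags
          · rw [if_pos hGm]
            refine upd_new d0 tags κ (false, w) (M.getD κ [] ++ [w]) (fun k hk hkκ => ?_)
            obtain ⟨L, hLs⟩ := Option.isSome_iff_exists.mp
              (fin_none_isSome (pvEvts tags k) (hnonnil k hk))
            have hMg : M.getD κ [] = L := by
              have := hvalNew k hk hkκ
              rwa [hLs] at this
            have hwL : w ∉ L := fun hw => hwl (by rw [hMg]; exact hw)
            rw [fin_snoc_app _ _ w L hLs, if_neg hwL, hMg]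
            rfl
          · rw [if_neg hGm, List.filter_append]
            have hκd : κ ∈ d0.keys := by
              rcases hcont.mp hc with h1 | h2
              · exact h1
              · exact absurd (List.mem_of_mem_filter h2) hGm
            rw [show List.filter (pvCond d0) [κ] = [] from by
                simp [pvCond, PySem.Dict.contains_eq_decide_mem_keys, hκd], List.append_nil]
            refine upd_new d0 tags κ (false, w) (M.getD κ [] ++ [w]) (fun k hk hkκ => ?_)
            exact absurd (hkκ ▸ List.mem_of_mem_filter hk) hGm
    · rw [if_neg hc]
      have hκd : κ ∉ d0.keys := fun hm => hc (hcont.mpr (Or.inl hm))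
      by_cases halpha : PySem.Str.strIsalpha κ = true
      · rw [if_pos halpha]
        have hc' : M.contains κ = false := by simpa using hc
        have hGm : κ ∉ pvGKeys tags := fun hg => hc (hcont.mpr (Or.inr (List.mem_filter.mpr
          ⟨hg, by simp [pvCond, show PySem.Chars.strIsalpha κ.toList = true from halpha, PySem.Dict.contains_eq_decide_mem_keys, hκd]⟩)))
        rw [PySem.Dict.items_insert_of_not_contains M [w] hc', hMit, pvSpecItems, if_neg hGm,
          List.filter_append,
          show List.filter (pvCond d0) [κ] = [κ] from by
            simp [pvCond, show PySem.Chars.strIsalpha κ.toList = true from halpha, PySem.Dict.contains_eq_decide_mem_keys, hκd],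
          List.map_append, List.append_assoc]
        congr 1
        · exact (base_congr d0 tags κ (false, w) (fun kv hkv hk => absurd
            (show κ ∈ d0.keys from hk ▸ (List.mem_map_of_mem hkv : kv.1 ∈ _)) hκd)).symm
        congr 1
        · exact (new_congr d0 tags κ (false, w) (fun k hk hkκ =>
            absurd (hkκ ▸ List.mem_of_mem_filter hk) hGm)).symm
        · simp [evts_of_not_gkey tags κ hGm, add_elemFin]
      · rw [if_neg halpha, hMit, pvSpecItems]
        have halpha' : PySem.Str.strIsalpha κ = false := by simpa using halpha
        have hstayNew : ∀ k ∈ (pvGKeys tags).filter (pvCond d0), κ = k →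
            (add_elemFin none (pvEvts tags k ++ [((false : Bool), w)])).getD []
              = (add_elemFin none (pvEvts tags k)).getD [] := by
          intro k hk hkκ
          have := (List.mem_filter.mp hk).2
          rw [← hkκ] at this
          simp [pvCond, show PySem.Chars.strIsalpha κ.toList = false from halpha'] at this
        by_cases hGm : κ ∈ pvGKeys tags
        · rw [if_pos hGm]
          congr 1
          · exact (base_congr d0 tags κ (false, w) (fun kv hkv hk => absurd
              (show κ ∈ d0.keys from hk ▸ (List.mem_map_of_mem hkv : kv.1 ∈ _)) hκd)).symm
          · exact (new_congr d0 tags κ (false, w) hstayNew).symm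
        · rw [if_neg hGm, List.filter_append,
            show List.filter (pvCond d0) [κ] = [] from by simp [pvCond, show PySem.Chars.strIsalpha κ.toList = false from halpha'],
            List.append_nil]
          congr 1
          · exact (base_congr d0 tags κ (false, w) (fun kv hkv hk => absurd
              (show κ ∈ d0.keys from hk ▸ (List.mem_map_of_mem hkv : kv.1 ∈ _)) hκd)).symm
          · exact (new_congr d0 tags κ (false, w) hstayNew).symm

lemma foldA (d0 : PySem.Dict String (List String)) (h : d0.keys.Nodup)
    (tags : List (String × String)) :
    tags.foldl pvStepC d0 = PySem.Dict.mk (pvSpecItems d0 tags) := by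
  induction tags using List.reverseRecOn with
  | nil =>
      simp [pvSpecItems, pvEvts, pvGKeys, add_elemFin, PySem.Set.ofList_nil]
  | append_singleton tags x ih =>
      rw [List.foldl_append, List.foldl_cons, List.foldl_nil, ih, step_spec d0 h]

-- a fold that inserts only under a condition, over fresh distinct keys, appends its selections
lemma items_foldl_insert_fresh_if {β κ ν : Type} [BEq κ] [LawfulBEq κ]
    (l : List β) (c : β → Bool) (k : β → κ) (v : β → ν) (d : PySem.Dict κ ν)
    (hfresh : ∀ a ∈ l, c a = true → d.contains (k a) = false)
    (hnd : ((l.filter c).map k).Nodup) :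
    (l.foldl (fun d a => if c a then d.insert (k a) (v a) else d) d).items
      = d.items ++ (l.filter c).map (fun a => (k a, v a)) := by
  induction l generalizing d with
  | nil => simp
  | cons a l ih =>
      by_cases hca : c a = true
      · have hnd' := hnd
        rw [List.filter_cons_of_pos hca, List.map_cons, List.nodup_cons] at hnd'
        have hfr : ∀ b ∈ l, c b = true → (d.insert (k a) (v a)).contains (k b) = false := by
          intro b hb hcb
          rw [PySem.Dict.contains_insert]
          have h1 : (k b == k a) = false := by
            refine beq_eq_false_iff_ne.mpr ?_
            intro e
            exact hnd'.1 (e ▸ List.mem_map_of_mem (List.mem_filter.mpr ⟨hb, hcb⟩) (f := k))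
          rw [h1, hfresh b (List.mem_cons_of_mem a hb) hcb]
          rfl
        rw [List.foldl_cons, if_pos hca,
          ih (d.insert (k a) (v a)) hfr hnd'.2,
          PySem.Dict.items_insert_of_not_contains d (v a) (hfresh a List.mem_cons_self hca),
          List.filter_cons_of_pos hca, List.map_cons, List.append_assoc, List.singleton_append]
      · have hca' : c a = false := by simpa using hca
        rw [List.foldl_cons, if_neg (by simp [hca']), List.filter_cons_of_neg (by simp [hca'])]
        exact ih d (fun b hb => hfresh b (List.mem_cons_of_mem a hb))
          (by rwa [List.filter_cons_of_neg (by simp [hca'])] at hnd)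

lemma alt_eq_spec (d : List (String × List String)) (tags : List (String × String))
    (h : (d.map Prod.fst).Nodup) :
    add_elem_alt d tags = pvSpecItems (PySem.Dict.mk d) tags := by
  simp only [add_elem_alt]
  set d0 : PySem.Dict String (List String) := PySem.Dict.mk d with hd0
  set pairs : List (String × (Bool × String)) := tags.map add_elemKeyEvent with hpairs
  set events : PySem.Dict String (List (Bool × String)) :=
    pairs.foldl (fun g p => g.modify p.1 [] (· ++ [p.2])) PySem.Dict.empty with hev
  have hget : ∀ k, events.getD k [] = pvEvts tags k := by
    intro k
    rw [hev, PySem.Dict.getD_foldl_modify_append]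
    simp [pvEvts, hpairs]
  have hkeys : events.keys = pvGKeys tags := by
    have := PySem.Dict.keys_foldl_modify_key pairs Prod.fst []
      (fun _ x => (· ++ [x.2])) PySem.Dict.empty
    rw [hev]
    rw [show (fun (g : PySem.Dict String (List (Bool × String))) (p : String × (Bool × String)) =>
          g.modify p.1 [] (· ++ [p.2]))
        = (fun g x => g.modify (Prod.fst x) [] ((fun _ x => (· ++ [x.2])) g x)) from rfl, this]
    simp [PySem.Dict.keys_empty, PySem.Set.update_nil_left, pvGKeys, hpairs]
  have hknd : events.keys.Nodup := by
    rw [hkeys]; exact PySem.Set.nodup_ofList _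
  -- phase 2, first loop: rebuild of d0 with finalized values
  set F : (String × List String) → List String :=
    (fun kv => (add_elemFin (some kv.2) (events.getD kv.1 [])).getD []) with hF
  have hout1 : (d0.items.foldl (fun out kv => out.insert kv.1 (F kv)) PySem.Dict.empty).items
      = d0.items.map (fun kv => (kv.1, F kv)) := by
    have := PySem.Dict.items_foldl_insert_fresh d0.items (fun kv => kv.1) F PySem.Dict.empty
      (fun a _ => PySem.Dict.contains_empty _) h
    simpa using this
  set out1 : PySem.Dict String (List String) :=
    d0.items.foldl (fun out kv => out.insert kv.1 (F kv)) PySem.Dict.empty with hout1d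
  set c : (String × List (Bool × String)) → Bool :=
    (fun ke => !(d0.contains ke.1) && PySem.Str.strIsalpha ke.1) with hc
  have hfresh2 : ∀ ke ∈ events.items, c ke = true → out1.contains ke.1 = false := by
    intro ke _ hcke
    have hk1 : out1.keys = d0.keys := by
      show out1.items.map Prod.fst = _
      rw [hout1, List.map_map]
      rfl
    rw [PySem.Dict.contains_eq_decide_mem_keys, hk1]
    rw [hc] at hcke
    simp only [Bool.and_eq_true, Bool.not_eq_true'] at hcke
    rw [PySem.Dict.contains_eq_decide_mem_keys] at hcke
    simpa using hcke.1
  have hnd2 : ((events.items.filter c).map Prod.fst).Nodup := by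
    have hsub : List.Sublist ((events.items.filter c).map Prod.fst) (events.items.map Prod.fst) :=
      List.Sublist.map Prod.fst List.filter_sublist
    exact (show (events.items.map Prod.fst).Nodup from hknd).sublist hsub
  have hout2 := items_foldl_insert_fresh_if events.items c Prod.fst
    (fun ke => (add_elemFin none ke.2).getD []) out1 hfresh2 hnd2
  have hitems : events.items = (pvGKeys tags).map (fun k => (k, pvEvts tags k)) := by
    rw [PySem.Dict.items_eq_map_keys events hknd [], hkeys]
    exact List.map_congr_left (fun k _ => by rw [hget])
  have hout2' : (List.foldl
        (fun (out : PySem.Dict String (List String)) (ke : String × List (Bool × String)) =>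
          if (!d0.contains ke.1 && PySem.Str.strIsalpha ke.1) = true then
            out.insert ke.1 ((add_elemFin none ke.2).getD [])
          else out)
        out1 events.items).items
      = out1.items ++ (events.items.filter c).map (fun ke => (ke.1, (add_elemFin none ke.2).getD [])) := hout2
  rw [hout2', hout1, hitems, List.filter_map, List.map_map]
  simp only [pvSpecItems, hF, hget, hc, Function.comp_def]
  rfl

-- ===== VERDICT (by name: the statement is the Claim_ definition above) =====
theorem add_elem_spec : Claim_equal_add_elem := by
  intro d tags _ hpre
  unfold Spec_add_elem
  rw [alt_eq_spec d tags hpre]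
  show (tags.foldl add_elemStepA (PySem.Dict.mk d)).items = _
  rw [List.foldl_ext add_elemStepA pvStepC (PySem.Dict.mk d) (fun acc x _ => stepA_eq_stepC acc x)]
  rw [foldA (PySem.Dict.mk d) hpre]
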